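-- pv_equiv track=rewrite | github.com/acibiber53/NonogramSolver | NS-v01.py | levelsearch
-- ===== SOURCE A (Python) =====
-- def levelsearch(partnumber, size):
--     if partnumber==1:
--         return str(size)
--     if size==1:
--         return str(1)
--     if size==2:
--         return str(2)
--
--     k=list()
--     small=1
--     big=size-((partnumber-1)*2)
--     while small <= big:
--         k.append(','.join([str(small)+stringo for stringo in levelsearch(partnumber-1,size-small-1).split(',')]))
--         small+=1
--     return ','.join([i for i in k])
-- ===== SOURCE B (Python) =====
-- def _row_val(prev, p, t):
--     # prev holds the level p-1 values for sizes 2*(p-1)-1, 2*(p-1), ... (in order)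
--     lo_prev = 2 * (p - 1) - 1
--     return ','.join(
--         ','.join(str(small) + c for c in prev[t - small - 1 - lo_prev].split(','))
--         for small in range(1, t - 2 * (p - 1) + 1)
--     )
--
--
-- def levelsearch(partnumber, size):
--     if partnumber == 1:
--         return str(size)
--     if size == 1:
--         return "1"
--     if size == 2:
--         return "2"
--     if size < 2 * partnumber - 1:
--         return ""
--     # bottom-up DP; level p only ever needs sizes 2*p-1 .. size-2*(partnumber-p),
--     # a window of constant width, so each needed subproblem is computed exactly once
--     width = size - 2 * partnumber + 2
--     prev = [str(1 + i) for i in range(width)]            # level 1: sizes 1 .. size-2*(partnumber-1)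
--     for p in range(2, partnumber):
--         prev = [_row_val(prev, p, 2 * p - 1 + i) for i in range(width)]
--     return _row_val(prev, partnumber, size)
-- ===== Notes on version B (the rewrite author's own statement) =====
-- stated objective: alternative
-- what changed: A's top-down recursion recomputes each (level,size) subproblem many times; B is an iterative bottom-up DP that fills, per level, one constant-width row of exactly the needed sub-results and assembles each row from the previous one, computing every subproblem once (no overall speed-up claimed: the exponential output size dominates both).
import Mathlib
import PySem

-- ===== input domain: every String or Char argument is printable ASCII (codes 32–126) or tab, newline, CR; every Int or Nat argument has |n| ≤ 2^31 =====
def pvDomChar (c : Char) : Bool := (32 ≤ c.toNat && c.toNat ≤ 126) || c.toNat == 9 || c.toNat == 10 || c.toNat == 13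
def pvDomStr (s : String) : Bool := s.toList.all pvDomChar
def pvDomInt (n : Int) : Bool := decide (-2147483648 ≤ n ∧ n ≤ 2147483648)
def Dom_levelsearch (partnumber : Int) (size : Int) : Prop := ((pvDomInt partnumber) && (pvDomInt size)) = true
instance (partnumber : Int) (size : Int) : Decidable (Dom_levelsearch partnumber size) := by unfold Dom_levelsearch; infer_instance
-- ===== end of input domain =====

-- B replaces A's naive exponentially-recomputing recursion by a bottom-up DP over (level, size) rows; objective: alternative (output size dominates, so no measured speed-up).

-- ===== PORT A =====
-- fuel = partnumber.toNat totalises the recursion; for partnumber ≥ 1 (Pre_) it is never exhausted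
-- (each call decreases partnumber by exactly 1 and bottoms out at partnumber = 1); for partnumber ≤ 0 Python diverges.
def lsGo (fuel : Nat) (partnumber size : Int) : String :=
  if partnumber = 1 then PySem.Int.toStr size
  else if size = 1 then PySem.Int.toStr 1
  else if size = 2 then PySem.Int.toStr 2
  else
    match fuel with
    | 0 => ""
    | Nat.succ f =>
      let big := size - (partnumber - 1) * 2
      let k := (PySem.List.pyRange 1 (big + 1) 1).map (fun small =>
        PySem.Str.join "," (((PySem.Str.split? (lsGo f (partnumber - 1) (size - small - 1)) ",").getD []).map
          (fun stringo => PySem.Int.toStr small ++ stringo)))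
      PySem.Str.join "," k

def levelsearch (partnumber : Int) (size : Int) : String :=
  lsGo partnumber.toNat partnumber size

-- ===== PORT B =====
def lsRowVal (prev : List String) (p : Int) (t : Int) : String :=
  PySem.Str.join "," ((PySem.List.pyRange 1 (t - 2 * (p - 1) + 1) 1).map (fun small =>
    PySem.Str.join ","
      (((PySem.Str.split? (PySem.List.pyGetD prev (t - small - 1 - (2 * (p - 1) - 1)) "") ",").getD []).map
        (fun c => PySem.Int.toStr small ++ c))))

def levelsearch_alt (partnumber : Int) (size : Int) : String :=
  if partnumber = 1 then PySem.Int.toStr size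
  else if size = 1 then "1"
  else if size = 2 then "2"
  else if size < 2 * partnumber - 1 then ""
  else
    let width := size - 2 * partnumber + 2
    let prev0 := (PySem.List.pyRange 0 width 1).map (fun i => PySem.Int.toStr (1 + i))
    let last := (PySem.List.pyRange 2 partnumber 1).foldl
      (fun prev p => (PySem.List.pyRange 0 width 1).map (fun i => lsRowVal prev p (2 * p - 1 + i))) prev0
    lsRowVal last partnumber size

-- ===== PRECONDITION & SPEC =====
-- Pre_ excludes exactly the inputs on which Python A never reaches a base case and raises RecursionError
-- (partnumber ≤ 0 with size ∉ {1, 2} and size ≥ 2·partnumber − 1); A returns on every input in Pre_.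
def Pre_levelsearch (partnumber : Int) (size : Int) : Prop :=
  1 ≤ partnumber ∨ size = 1 ∨ size = 2 ∨ size < 2 * partnumber - 1
instance (partnumber : Int) (size : Int) : Decidable (Pre_levelsearch partnumber size) := by unfold Pre_levelsearch; infer_instance
def pvWitness_levelsearch : Int × Int := (3, 8)

def Spec_levelsearch (partnumber : Int) (size : Int) (out : String) : Prop := out = levelsearch_alt partnumber size
instance (partnumber : Int) (size : Int) (out : String) : Decidable (Spec_levelsearch partnumber size out) := by unfold Spec_levelsearch; infer_instance

-- ===== CLAIM (what is proved, stated in full; the proofs are below) =====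
def Claim_equal_levelsearch : Prop := ∀ (partnumber : Int) (size : Int), Dom_levelsearch partnumber size → Pre_levelsearch partnumber size → Spec_levelsearch partnumber size (levelsearch partnumber size)

-- ===== LEMMAS AND PROOFS =====

theorem ls_one (s : Int) : levelsearch 1 s = PySem.Int.toStr s := by
  simp [levelsearch, lsGo]

-- fuel-free unfolding of A's recursion for partnumber ≥ 2
theorem ls_rec (pn s : Int) (hpn : 2 ≤ pn) (h1 : s ≠ 1) (h2 : s ≠ 2) :
    levelsearch pn s =
      PySem.Str.join "," ((PySem.List.pyRange 1 (s - (pn - 1) * 2 + 1) 1).map (fun small =>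
        PySem.Str.join "," (((PySem.Str.split? (levelsearch (pn - 1) (s - small - 1)) ",").getD []).map
          (fun stringo => PySem.Int.toStr small ++ stringo)))) := by
  have hne : pn ≠ 1 := by omega
  have hfuel : pn.toNat = (pn - 1).toNat + 1 := by omega
  show lsGo pn.toNat pn s = _
  rw [hfuel, lsGo]
  simp [hne, h1, h2, levelsearch]

theorem toStr_one : PySem.Int.toStr 1 = "1" := by decide

theorem toStr_two : PySem.Int.toStr 2 = "2" := by decide

theorem lsGo_base1 (fuel : Nat) (pn : Int) (h : pn ≠ 1) : lsGo fuel pn 1 = "1" := by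
  cases fuel <;> simp [lsGo, h, toStr_one]

theorem lsGo_base2 (fuel : Nat) (pn : Int) (h : pn ≠ 1) : lsGo fuel pn 2 = "2" := by
  cases fuel <;> simp [lsGo, h, toStr_two]

theorem ls_base1 (pn : Int) (h : pn ≠ 1) : levelsearch pn 1 = "1" :=
  lsGo_base1 _ _ h

theorem ls_base2 (pn : Int) (h : pn ≠ 1) : levelsearch pn 2 = "2" :=
  lsGo_base2 _ _ h

-- the DP rows of B compute exactly A's values on the sliding window, level by level
theorem rows_inv (w : Int) (p : Int) (hp : 1 ≤ p) :
    (PySem.List.pyRange 2 (p + 1) 1).foldl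
      (fun prev q => (PySem.List.pyRange 0 w 1).map (fun i => lsRowVal prev q (2 * q - 1 + i)))
      ((PySem.List.pyRange 0 w 1).map (fun i => PySem.Int.toStr (1 + i)))
    = (PySem.List.pyRange 0 w 1).map (fun i => levelsearch p (2 * p - 1 + i)) := by
  induction p, hp using Int.le_induction with
  | base =>
    have hnil : PySem.List.pyRange 2 (1 + 1) = ([] : List Int) :=
      PySem.List.pyRange_one_eq_nil (by omega)
    rw [hnil, List.foldl_nil]
    apply List.map_congr_left
    intro i _
    rw [ls_one, show (2 * (1 : Int) - 1 + i) = 1 + i from by ring]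
  | succ p hp ih =>
    have hsplit : PySem.List.pyRange 2 (p + 1 + 1)
        = PySem.List.pyRange 2 (p + 1) ++ [p + 1] := by
      rw [PySem.List.pyRange_one_succ_right (by omega)]
    rw [hsplit, List.foldl_append, ih]
    simp only [List.foldl_cons, List.foldl_nil]
    apply List.map_congr_left
    intro i hi
    rw [PySem.List.mem_pyRange_one] at hi
    rw [ls_rec (p + 1) (2 * (p + 1) - 1 + i) (by omega) (by omega) (by omega)]
    unfold lsRowVal
    rw [show ((p : Int) + 1 - 1) = p from by ring,
        show (2 * ((p : Int) + 1) - 1 + i - 2 * p + 1) = 2 * (p + 1) - 1 + i - p * 2 + 1 from by ring]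
    apply congrArg
    apply List.map_congr_left
    intro small hsm
    rw [PySem.List.mem_pyRange_one] at hsm
    have hget : PySem.List.pyGetD
        ((PySem.List.pyRange 0 w 1).map (fun i => levelsearch p (2 * p - 1 + i)))
        (2 * (p + 1) - 1 + i - small - 1 - (2 * p - 1)) ""
        = levelsearch p (2 * p - 1 + (2 * (p + 1) - 1 + i - small - 1 - (2 * p - 1))) := by
      apply PySem.List.pyGetD_map_pyRange_of_nonneg
      · omega
      · omega
    rw [hget, show (2 * p - 1 + (2 * ((p : Int) + 1) - 1 + i - small - 1 - (2 * p - 1)))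
          = 2 * (p + 1) - 1 + i - small - 1 from by ring]

-- ===== VERDICT (by name: the statement is the Claim_ definition above) =====
theorem levelsearch_spec : Claim_equal_levelsearch := by
  intro pn s _ hpre
  unfold Spec_levelsearch levelsearch_alt
  by_cases h1 : pn = 1
  · subst h1; simp [ls_one]
  rw [if_neg h1]
  by_cases hs1 : s = 1
  · subst hs1; rw [if_pos rfl]; exact ls_base1 pn h1
  rw [if_neg hs1]
  by_cases hs2 : s = 2
  · subst hs2; rw [if_pos rfl]; exact ls_base2 pn h1
  rw [if_neg hs2]
  by_cases hsmall : s < 2 * pn - 1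
  · -- loop empty (pn ≥ 2) or fuel 0 (pn ≤ 0): A returns "" either way, as B does
    rw [if_pos hsmall]
    by_cases hpn2 : 2 ≤ pn
    · have hnil : PySem.List.pyRange 1 (s - (pn - 1) * 2 + 1) = ([] : List Int) :=
        PySem.List.pyRange_one_eq_nil (by omega)
      rw [ls_rec pn s hpn2 hs1 hs2, hnil]
      rfl
    · show lsGo pn.toNat pn s = ""
      rw [show pn.toNat = 0 from by omega]
      simp [lsGo, h1, hs1, hs2]
  · rw [if_neg hsmall]
    have hpn2 : 2 ≤ pn := by
      unfold Pre_levelsearch at hpre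
      omega
    simp only
    have hrows := rows_inv (s - 2 * pn + 2) (pn - 1) (by omega)
    rw [show ((pn : Int) - 1 + 1) = pn from by ring] at hrows
    rw [hrows, ls_rec pn s hpn2 hs1 hs2]
    unfold lsRowVal
    rw [show (s - 2 * (pn - 1) + 1) = s - (pn - 1) * 2 + 1 from by ring]
    apply congrArg
    apply List.map_congr_left
    intro small hsm
    rw [PySem.List.mem_pyRange_one] at hsm
    have hget : PySem.List.pyGetD
        ((PySem.List.pyRange 0 (s - 2 * pn + 2) 1).map (fun i => levelsearch (pn - 1) (2 * (pn - 1) - 1 + i)))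
        (s - small - 1 - (2 * (pn - 1) - 1)) ""
        = levelsearch (pn - 1) (2 * (pn - 1) - 1 + (s - small - 1 - (2 * (pn - 1) - 1))) := by
      apply PySem.List.pyGetD_map_pyRange_of_nonneg
      · omega
      · omega
    rw [hget, show (2 * (pn - 1) - 1 + (s - small - 1 - (2 * (pn - 1) - 1))) = s - small - 1 from by ring]
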